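-- pv_equiv track=rewrite | github.com/ASSERT-KTH/Mokav | experiments/pynguin/c4b/single-return/generated_tests/src_15/2/src_15.py | func
-- ===== SOURCE A (Python) =====
-- def func(*args):
--
-- 	n = int(args[0])
-- 	a = ''
-- 	if ((n % 2) and (n >= 3)):
-- 	    n -= 3
-- 	    a += '7'
-- 	while (n > 0):
-- 	    n -= 2
-- 	    a += '1'
-- 	return(a)
-- ===== SOURCE B (Python) =====
-- def func(*args):
--     n = int(args[0])
--     if n % 2 and n >= 3:
--         return '7' + '1' * ((n - 3) // 2)
--     if n > 0:
--         return '1' * ((n + 1) // 2)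
--     return ''
-- ===== Notes on version B (the rewrite author's own statement) =====
-- stated objective: faster
-- what changed: Replaces the decrement-by-two while loop with quadratic repeated string concatenation by a closed-form count of ones and a single string multiplication.
import Mathlib
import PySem

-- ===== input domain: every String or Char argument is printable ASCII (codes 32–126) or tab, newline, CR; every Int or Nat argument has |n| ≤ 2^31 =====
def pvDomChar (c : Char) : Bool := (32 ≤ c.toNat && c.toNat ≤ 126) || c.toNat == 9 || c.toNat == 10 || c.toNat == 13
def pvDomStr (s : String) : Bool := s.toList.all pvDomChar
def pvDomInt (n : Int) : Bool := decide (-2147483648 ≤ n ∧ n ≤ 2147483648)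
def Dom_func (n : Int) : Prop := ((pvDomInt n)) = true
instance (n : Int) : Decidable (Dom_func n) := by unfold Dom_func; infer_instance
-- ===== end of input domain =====

-- B replaces A's decrement-by-2 while loop with a closed-form count of ones and a single string repetition (faster: no quadratic repeated concatenation).

-- ===== PORT A =====
-- the while-loop of A: while n > 0: n -= 2; a += '1'
def funcLoop (n : Int) (a : String) : String :=
  if n > 0 then funcLoop (n - 2) (a ++ "1") else a
termination_by n.toNat
decreasing_by
  have : n - 2 < n := by omega
  omega

def func (n : Int) : String :=
  if n % 2 ≠ 0 ∧ n ≥ 3 then funcLoop (n - 3) ("" ++ "7")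
  else funcLoop n ""

-- ===== PORT B =====
def func_alt (n : Int) : String :=
  if n % 2 ≠ 0 ∧ n ≥ 3 then "7" ++ String.ofList (List.replicate ((n - 3) / 2).toNat '1')
  else if n > 0 then String.ofList (List.replicate ((n + 1) / 2).toNat '1')
  else ""

-- ===== PRECONDITION & SPEC =====
def Spec_func (n : Int) (out : String) : Prop := out = func_alt n
instance (n : Int) (out : String) : Decidable (Spec_func n out) := by unfold Spec_func; infer_instance

-- ===== CLAIM (what is proved, stated in full; the proofs are below) =====
def Claim_equal_func : Prop := ∀ (n : Int), Dom_func n → Spec_func n (func n)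

-- ===== LEMMAS AND PROOFS =====

theorem funcLoop_eq (n : Int) (a : String) :
    funcLoop n a = a ++ String.ofList (List.replicate ((n + 1) / 2).toNat '1') := by
  induction n, a using funcLoop.induct with
  | case1 n a h ih =>
    rw [funcLoop, if_pos h, ih]
    have h2 : ((n + 1) / 2).toNat = ((n - 2 + 1) / 2).toNat + 1 := by omega
    rw [h2, List.replicate_succ]
    have : ('1' :: List.replicate ((n - 2 + 1) / 2).toNat '1') = ['1'] ++ List.replicate ((n - 2 + 1) / 2).toNat '1' := rfl
    rw [this, String.ofList_append, String.append_assoc]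
  | case2 n a h =>
    have h2 : ((n + 1) / 2).toNat = 0 := by omega
    rw [funcLoop, if_neg h, h2]
    simp

-- ===== VERDICT (by name: the statement is the Claim_ definition above) =====
theorem func_spec : Claim_equal_func := by
  intro n _
  unfold Spec_func func func_alt
  by_cases h : n % 2 ≠ 0 ∧ n ≥ 3
  · rw [if_pos h, if_pos h, funcLoop_eq]
    have : ((n - 3 + 1) / 2).toNat = ((n - 3) / 2).toNat := by omega
    rw [this]
    rfl
  · rw [if_neg h, if_neg h, funcLoop_eq]
    by_cases hp : n > 0
    · rw [if_pos hp]; rfl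
    · rw [if_neg hp]
      have : ((n + 1) / 2).toNat = 0 := by omega
      simp [this]
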